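-- pv_equiv track=rewrite | github.com/emmanuel-xircls/chattingapp | django-chat-app-main/chat/views__.py | optimize_code
-- ===== SOURCE A (Python) =====
-- from collections import Counter
--
-- def optimize_code(chatanswers):
--     """
--     Optimizes the given code.
--
--     Args:
--       chatanswers: The list of chat answers.
--
--     Returns:
--       A new list with the optimized code.
--     """
--
--     optimized_code = []
--
--     for sublist in chatanswers:
--         element_counts = Counter(sublist)
--         sorted_elements = sorted(element_counts, key=lambda x: element_counts[x], reverse=True)
--         unique_elements = [elem for elem in sorted_elements if elem not in ["", "[cls]"] and "[cls]" not in elem and "[sep]" not in elem]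
--         optimized_code.append(unique_elements)
--
--     return optimized_code
-- ===== SOURCE B (Python) =====
-- def optimize_code(chatanswers):
--     """Counting-sort variant: bucket elements by frequency instead of calling sorted()."""
--     result = []
--     for sublist in chatanswers:
--         counts = {}
--         for elem in sublist:
--             counts[elem] = counts.get(elem, 0) + 1
--         maxc = max(counts.values(), default=0)
--         ordered = []
--         for c in range(maxc, 0, -1):
--             ordered += [e for e in counts if counts[e] == c]
--         result.append([e for e in ordered
--                        if e not in ["", "[cls]"] and "[cls]" not in e and "[sep]" not in e])
--     return result
-- ===== Notes on version B (the rewrite author's own statement) =====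
-- stated objective: alternative
-- what changed: Replaces Python's sorted(..., key=count, reverse=True) with a hand-rolled stable counting sort: a frequency dict built in one loop, then buckets concatenated from the maximum count down to 1, reproducing the stable descending-by-frequency order; the separator filter is applied to that ordered list.
import Mathlib
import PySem

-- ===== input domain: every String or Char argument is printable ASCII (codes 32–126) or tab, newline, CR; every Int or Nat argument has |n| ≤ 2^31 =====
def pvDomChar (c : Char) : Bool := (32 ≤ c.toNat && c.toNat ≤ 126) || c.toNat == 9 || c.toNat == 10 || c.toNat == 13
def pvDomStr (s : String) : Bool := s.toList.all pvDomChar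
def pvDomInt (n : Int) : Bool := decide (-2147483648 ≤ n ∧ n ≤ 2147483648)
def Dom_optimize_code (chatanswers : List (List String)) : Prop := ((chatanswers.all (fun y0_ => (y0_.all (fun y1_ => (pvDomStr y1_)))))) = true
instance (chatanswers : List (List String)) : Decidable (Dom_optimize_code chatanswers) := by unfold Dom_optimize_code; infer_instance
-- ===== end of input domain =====

-- B replaces the stable reverse sort by count with a counting sort over buckets taken
-- from the maximum count down to 1 (alternative decomposition, similar cost).

-- shared helper: the verbatim Python filter
-- 'elem not in ["", "[cls]"] and "[cls]" not in elem and "[sep]" not in elem'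
def pvKeep (e : String) : Bool :=
  !(e == "" || e == "[cls]") && !(PySem.Str.isIn "[cls]" e) && !(PySem.Str.isIn "[sep]" e)

-- ===== PORT A =====
def optimize_code (chatanswers : List (List String)) : List (List String) :=
  chatanswers.foldl (fun optimized_code sublist =>
    let element_counts := PySem.Dict.counter sublist
    let sorted_elements :=
      PySem.List.sorted element_counts.keys (fun x => element_counts.getD x 0) true
    let unique_elements := sorted_elements.filter pvKeep
    optimized_code ++ [unique_elements]) []

-- ===== PORT B =====
def optimize_code_alt (chatanswers : List (List String)) : List (List String) :=
  chatanswers.foldl (fun result sublist =>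
    let counts := sublist.foldl (fun d e => d.insert e (d.getD e 0 + 1)) PySem.Dict.empty
    let maxc := PySem.List.maxD counts.values (fun v => v) 0
    let ordered := (PySem.List.pyRange maxc 0 (-1)).foldl
      (fun out c => out ++ counts.keys.filter (fun e => counts.getD e 0 == c)) []
    result ++ [ordered.filter pvKeep]) []

-- ===== PRECONDITION & SPEC =====
def Spec_optimize_code (chatanswers : List (List String)) (out : List (List String)) : Prop := out = optimize_code_alt chatanswers
instance (chatanswers : List (List String)) (out : List (List String)) : Decidable (Spec_optimize_code chatanswers out) := by unfold Spec_optimize_code; infer_instance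

-- ===== CLAIM (what is proved, stated in full; the proofs are below) =====
def Claim_equal_optimize_code : Prop := ∀ (chatanswers : List (List String)), Dom_optimize_code chatanswers → Spec_optimize_code chatanswers (optimize_code chatanswers)

-- ===== LEMMAS AND PROOFS =====

-- insertBy passes over a prefix it must not go before
theorem pv_insertBy_append {α : Type} (before : α → α → Bool) (x : α) (l1 l2 : List α)
    (h : ∀ y ∈ l1, before x y = false) :
    PySem.List.insertBy before x (l1 ++ l2) = l1 ++ PySem.List.insertBy before x l2 := by
  induction l1 with
  | nil => simp
  | cons a l ih =>
    simp only [List.cons_append, PySem.List.insertBy, h a (by simp)]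
    simp [ih (fun y hy => h y (by simp [hy]))]

-- insertBy goes to the front when it precedes every element
theorem pv_insertBy_front {α : Type} (before : α → α → Bool) (x : α) (ys : List α)
    (h : ∀ y ∈ ys, before x y = true) :
    PySem.List.insertBy before x ys = x :: ys := by
  cases ys with
  | nil => rfl
  | cons a l => simp [PySem.List.insertBy, h a (by simp)]

-- inserting one element into a descending bucket decomposition lands at the end of its bucket
theorem pv_insert_buckets {α : Type} (key : α → Int) (x : α) :
    ∀ (vs : List Int) (xs : List α), vs.Pairwise (· > ·) → key x ∈ vs →
    PySem.List.insertBy (fun a b => decide (key b < key a)) x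
        (vs.flatMap (fun c => xs.filter (fun y => key y == c)))
      = vs.flatMap (fun c => (xs ++ [x]).filter (fun y => key y == c)) := by
  intro vs
  induction vs with
  | nil => intro xs _ hx; simp at hx
  | cons c vs ih =>
    intro xs hpw hx
    have hlt : ∀ v ∈ vs, v < c := by
      intro v hv; exact (List.pairwise_cons.1 hpw).1 v hv
    by_cases hc : key x = c
    · -- x joins the first bucket, at its end
      have hrest : vs.flatMap (fun c' => (xs ++ [x]).filter (fun y => key y == c'))
          = vs.flatMap (fun c' => xs.filter (fun y => key y == c')) := by
        apply List.flatMap_congr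
        intro c' hc'
        have h2 : c' < c := hlt c' hc'
        have : (key x == c') = false := by
          simp only [beq_eq_false_iff_ne]; omega
        simp [List.filter_append, this]
      have hfc : (xs ++ [x]).filter (fun y => key y == c) = xs.filter (fun y => key y == c) ++ [x] := by
        simp [List.filter_append, hc]
      rw [List.flatMap_cons, List.flatMap_cons, hrest, hfc,
        pv_insertBy_append _ _ _ _ (by
          intro y hy
          have : key y = c := by simpa using (List.mem_filter.1 hy).2
          simp [this, hc]),
        pv_insertBy_front _ _ _ (by
          intro y hy
          obtain ⟨c', hc', hyf⟩ := List.mem_flatMap.1 hy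
          have : key y = c' := by simpa using (List.mem_filter.1 hyf).2
          have h2 : c' < c := hlt c' hc'
          simp only [decide_eq_true_eq]; omega)]
      simp
    · -- x belongs to a later bucket
      have hx' : key x ∈ vs := by
        rcases List.mem_cons.1 hx with h | h
        · exact absurd h hc
        · exact h
      have hfc : (xs ++ [x]).filter (fun y => key y == c) = xs.filter (fun y => key y == c) := by
        simp [List.filter_append, hc]
      rw [List.flatMap_cons, List.flatMap_cons, hfc,
        pv_insertBy_append _ _ _ _ (by
          intro y hy
          have hkc : key y = c := by simpa using (List.mem_filter.1 hy).2
          have h2 : key x < c := hlt _ hx'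
          simp only [decide_eq_false_iff_not]; omega),
        ih xs (List.pairwise_cons.1 hpw).2 hx']

-- stable reverse sort by key = descending bucket concatenation
theorem pv_bucket_sort {α : Type} (key : α → Int) :
    ∀ (xs : List α) (vs : List Int), vs.Pairwise (· > ·) → (∀ x ∈ xs, key x ∈ vs) →
    PySem.List.sorted xs key true = vs.flatMap (fun c => xs.filter (fun y => key y == c)) := by
  intro xs
  induction xs using List.reverseRecOn with
  | nil => intro vs _ _; simp [PySem.List.sorted]
  | append_singleton xs x ih =>
    intro vs hpw hmem
    have h1 : PySem.List.sorted (xs ++ [x]) key true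
        = PySem.List.insertBy (fun a b => decide (key b < key a)) x (PySem.List.sorted xs key true) := by
      rw [PySem.List.sorted_rev_eq_foldl_insertBy, PySem.List.sorted_rev_eq_foldl_insertBy,
        List.foldl_append]
      rfl
    rw [h1, ih vs hpw (fun y hy => hmem y (by simp [hy]))]
    exact pv_insert_buckets key x vs xs hpw (hmem x (by simp))

-- every value of a nonempty list is at most max(values, default=0)
theorem pv_le_maxD (vals : List Int) (v : Int) (hv : v ∈ vals) :
    v ≤ PySem.List.maxD vals (fun x => x) 0 := by
  unfold PySem.List.maxD
  cases hm : PySem.List.max? vals (fun x => x) with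
  | none => rw [(PySem.List.max?_eq_none_iff _ _).1 hm] at hv; simp at hv
  | some m => simpa using PySem.List.max?_isMax hm v hv

-- the two per-sublist computations agree
theorem pv_process (sublist : List String) :
    (PySem.List.sorted (PySem.Dict.counter sublist).keys
        (fun x => (PySem.Dict.counter sublist).getD x 0) true).filter pvKeep
    = ((PySem.List.pyRange
          (PySem.List.maxD (PySem.Dict.counter sublist).values (fun v => v) 0) 0 (-1)).foldl
        (fun out c => out ++ (PySem.Dict.counter sublist).keys.filter
          (fun e => (PySem.Dict.counter sublist).getD e 0 == c)) []).filter pvKeep := by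
  rw [PySem.List.foldl_append_eq_flatMap]
  simp only [List.nil_append]
  congr 1
  apply pv_bucket_sort
  · rw [PySem.List.pyRange_neg_one, List.pairwise_map]
    exact (List.pairwise_lt_range).imp (by intro a b h; omega)
  · intro k hk
    have hk' := (PySem.Set.mem_ofList _ _).1 ((PySem.Dict.keys_counter sublist) ▸ hk)
    rw [PySem.List.mem_pyRange_neg_one]
    constructor
    · rw [PySem.Dict.getD_counter]
      exact_mod_cast List.count_pos_iff.2 hk'
    · apply pv_le_maxD
      rw [PySem.Dict.values_eq_map_keys _ (PySem.Dict.nodup_keys_counter sublist) 0]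
      exact List.mem_map_of_mem hk

-- ===== VERDICT (by name: the statement is the Claim_ definition above) =====
theorem optimize_code_spec : Claim_equal_optimize_code := by
  intro chatanswers _
  unfold Spec_optimize_code optimize_code optimize_code_alt
  congr 1
  funext acc sublist
  simp only [PySem.Dict.foldl_insert_getD_add_one_eq_counter]
  rw [pv_process sublist]
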